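/-
  THE LANGUAGE jsmn ACCEPTS, PART 4: THE TOKEN MODE OF THE STRICT BUILD (-DJSMN_STRICT -DJSMN_PARENT_LINKS) — THE MACHINE

  The strict build has the lexer of Json/Jsmn/AcceptLang.lean in its strict form (`lex true`: a primitive starts with - 0…9 t f n, any other
  byte outside strings is -2; `:` is NOT a stop character inside a primitive; a primitive that runs to the end of the text is -3) and, on
  top of the bracket check, three rules that look at the SUPERIOR token `toksuper` (the token the next one will be counted into):
      (S1) `{` or `[` when the superior token is an OBJECT: -2                      ("an object or array can't become a key")
      (S2) a primitive when the superior token is an OBJECT: -2                      ("primitives must not be keys")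
      (S3) a primitive when the superior token is a STRING that already has a child: -2
  Strings are never checked: they may stand anywhere. What the superior token is, is decided by jsmn's bookkeeping, not by JSON's grammar:
      after `{` `[`        the new container;
      after `:`            the LAST token made, whatever it is — open or closed, a key or not;
      after `,`            if the superior is a string or primitive: ITS parent; else unchanged;
      after `}` `]`        the parent of the container just closed;
      after a string or primitive: unchanged.
  And the closing bracket itself walks up the PARENT LINKS from the last token made to the first open token, which must be of the
  bracket's kind. If there is NO open token on the way, the walk ends at a token without parent, and the bracket is accepted when that
  token has the bracket's kind and `toksuper` is not -1 (finding J of Json/Jsmn/AcceptTable.lean: `{}:}` is accepted).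

  `strictRun` below is that bookkeeping on a list of `Node`s — what jsmn remembers of each token: its type, whether it is open, its
  parent, whether anything has been counted into it — run over the items of the lexer. `strictResult` is what jsmn_parse answers.
  THE THEOREM (`token_mode_strict`, Json/Jsmn/AcceptLangStrictMain.lean): jsmn_init; jsmn_parse = strictResult (lex true .top js).
-/
import Json.Jsmn.AcceptLang

namespace Jsmn.AcceptLang
open Jsmn

/-- What the strict build's checks look at in a token. -/
structure Node where
  /-- 1 object, 2 array, 4 string, 8 primitive (JSMN_OBJECT …) -/
  type : Nat
  /-- an object or array that has not been closed yet -/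
  isOpen : Bool
  /-- the index of the parent token, -1 if none -/
  parent : Int
  /-- something has been counted into it (`size != 0`) -/
  hasChild : Bool
deriving DecidableEq, Repr, Inhabited

/-- `nodes[i]` (`default` outside the list, like the model's `tokAt`). -/
def nodeAt (ns : List Node) (i : Int) : Node := if i < 0 then default else ns.getD i.toNat default

/-- `nodes[i] := f nodes[i]` (nothing outside the list). -/
def nodeUpd (ns : List Node) (i : Int) (f : Node → Node) : List Node := if i < 0 then ns else ns.set i.toNat (f (nodeAt ns i))

/-- `tokens[toksuper].size++` if there is a superior token. -/
def countInto (ns : List Node) (sup : Int) : List Node :=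
  if sup != -1 then nodeUpd ns sup fun t => { t with hasChild := true } else ns

/-- The walk of a closing bracket of type `type` up the parent links, from token `idx`. `none`: JSMN_ERROR_INVAL. Else the nodes and
the superior token afterwards. (`fuel`: the links go down, `ns.length + 1` is enough; running out of it counts as `none`.) -/
def closeWalk (type : Nat) (ns : List Node) (sup : Int) : (fuel : Nat) → (idx : Int) → Option (List Node × Int)
  | 0, _ => none
  | fuel + 1, idx =>
    let t := nodeAt ns idx
    if t.isOpen then
      if t.type != type then none else some (nodeUpd ns idx fun t => { t with isOpen := false }, t.parent)
    else if t.parent == -1 then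
      if t.type != type || sup == -1 then none else some (ns, sup)
    else closeWalk type ns sup fuel t.parent

/-- One item. `none`: JSMN_ERROR_INVAL. -/
def strictStep (ns : List Node) (sup : Int) : Item → Option (List Node × Int)
  | .objOpen =>
    if sup != -1 && (nodeAt ns sup).type == JSMN_OBJECT then none                       -- (S1)
    else some (countInto ns sup ++ [⟨JSMN_OBJECT, true, sup, false⟩], ns.length)
  | .arrOpen =>
    if sup != -1 && (nodeAt ns sup).type == JSMN_OBJECT then none                       -- (S1)
    else some (countInto ns sup ++ [⟨JSMN_ARRAY, true, sup, false⟩], ns.length)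
  | .objClose => if ns.length < 1 then none else closeWalk JSMN_OBJECT ns sup (ns.length + 1) ((ns.length : Int) - 1)
  | .arrClose => if ns.length < 1 then none else closeWalk JSMN_ARRAY ns sup (ns.length + 1) ((ns.length : Int) - 1)
  | .colon => some (ns, (ns.length : Int) - 1)
  | .comma =>
    if sup != -1 && (nodeAt ns sup).type != JSMN_ARRAY && (nodeAt ns sup).type != JSMN_OBJECT then some (ns, (nodeAt ns sup).parent)
    else some (ns, sup)
  | .str => some (countInto ns sup ++ [⟨JSMN_STRING, false, sup, false⟩], sup)
  | .prim =>
    if sup != -1 && ((nodeAt ns sup).type == JSMN_OBJECT ||                              -- (S2)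
        ((nodeAt ns sup).type == JSMN_STRING && (nodeAt ns sup).hasChild)) then none     -- (S3)
    else some (countInto ns sup ++ [⟨JSMN_PRIMITIVE, false, sup, false⟩], sup)

/-- All items. `none`: JSMN_ERROR_INVAL. -/
def strictRun (ns : List Node) (sup : Int) : List Item → Option (List Node × Int)
  | [] => some (ns, sup)
  | i :: is =>
    match strictStep ns sup i with
    | none => none
    | some (ns', sup') => strictRun ns' sup' is

/-- What the strict build answers when the nodes are `ns`, the superior token is `sup`, and the rest of the text lexes to `r`. -/
def strictFrom (ns : List Node) (sup : Int) (r : List Item × Ending) : Int :=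
  match strictRun ns sup r.1 with
  | none => JSMN_ERROR_INVAL
  | some (ns', _) =>
    match r.2 with
    | .inval => JSMN_ERROR_INVAL
    | .part => JSMN_ERROR_PART
    | .eof => if ns'.any (·.isOpen) then JSMN_ERROR_PART else ns'.length

/-- **What the token mode of the strict build answers** on a text that lexes (strictly) to `r`. -/
def strictResult (r : List Item × Ending) : Int := strictFrom [] (-1) r

/-! The machine on inputs of Json/Jsmn/AcceptTable.lean (same answers as the theorems `s_…` there). -/
example : strictResult (lex true .top (ascii "{\"a\":1,\"b\":[true,null]}")) = 7 := by decide
example : strictResult (lex true .top (ascii "{\"a\":1 \"b\":2}")) = 5 := by decide       -- missing comma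
example : strictResult (lex true .top (ascii "{\"a\":1 2}")) = -2 := by decide            -- (S3)
example : strictResult (lex true .top (ascii "{1:2}")) = -2 := by decide                  -- (S2)
example : strictResult (lex true .top (ascii "{[1]:2}")) = -2 := by decide                -- (S1)
example : strictResult (lex true .top (ascii "{\"a\":\"b\" \"c\"}")) = 4 := by decide     -- strings are never checked
example : strictResult (lex true .top (ascii "{}:}")) = 1 := by decide                    -- finding J
example : strictResult (lex true .top (ascii "[1]:]:]")) = 2 := by decide                 -- finding J
example : strictResult (lex true .top (ascii "{}:]")) = -2 := by decide
example : strictResult (lex true .top (ascii "[1:2]")) = 2 := by decide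
example : strictResult (lex true .top (ascii "42")) = -3 := by decide
example : strictResult (lex true .top (ascii "[[1]")) = -3 := by decide

end Jsmn.AcceptLang
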